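-- pv_equiv track=rewrite | github.com/Ragnvald88/roberg-boekhouding | import_/seed_2025_expenses.py | match_pdf
-- ===== SOURCE A (Python) =====
-- def match_pdf(category, datum, pdf_index, used_pdfs):
--     """Try to find a matching PDF for an expense. Returns filename or ''."""
--     candidates = pdf_index.get(category, [])
--     if not candidates:
--         return ''
--
--     month = datum[5:7]
--     year_short = datum[2:4]
--
--     for pdf in candidates:
--         if pdf in used_pdfs:
--             continue
--         pdf_lower = pdf.lower()
--         if (f'{month}{year_short}' in pdf_lower or f'{month}_{year_short}' in pdf_lower
--                 or f'{month}-{year_short}' in pdf_lower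
--                 or f'{year_short}{month}' in pdf_lower):
--             used_pdfs.add(pdf)
--             return pdf
--
--     # Fallback: first unused
--     for pdf in candidates:
--         if pdf not in used_pdfs:
--             used_pdfs.add(pdf)
--             return pdf
--
--     return ''
-- ===== SOURCE B (Python) =====
-- def match_pdf(category, datum, pdf_index, used_pdfs):
--     """Single forward pass: return first unused date-matching PDF, else the
--     first unused PDF recorded as fallback during the same pass, else ''."""
--     candidates = pdf_index.get(category, [])
--     if not candidates:
--         return ''
--
--     month = datum[5:7]
--     year_short = datum[2:4]
--     patterns = (f'{month}{year_short}', f'{month}_{year_short}',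
--                 f'{month}-{year_short}', f'{year_short}{month}')
--
--     fallback = None
--     for pdf in candidates:
--         if pdf in used_pdfs:
--             continue
--         low = pdf.lower()
--         if any(p in low for p in patterns):
--             used_pdfs.add(pdf)
--             return pdf
--         if fallback is None:
--             fallback = pdf
--
--     if fallback is not None:
--         used_pdfs.add(fallback)
--         return fallback
--     return ''
-- ===== Notes on version B (the rewrite author's own statement) =====
-- stated objective: alternative
-- what changed: Replaces A's two full scans over the candidate list (date-match scan, then first-unused fallback scan) with a single forward pass that records the first unused candidate as a fallback while searching for a date match.
import Mathlib
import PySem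

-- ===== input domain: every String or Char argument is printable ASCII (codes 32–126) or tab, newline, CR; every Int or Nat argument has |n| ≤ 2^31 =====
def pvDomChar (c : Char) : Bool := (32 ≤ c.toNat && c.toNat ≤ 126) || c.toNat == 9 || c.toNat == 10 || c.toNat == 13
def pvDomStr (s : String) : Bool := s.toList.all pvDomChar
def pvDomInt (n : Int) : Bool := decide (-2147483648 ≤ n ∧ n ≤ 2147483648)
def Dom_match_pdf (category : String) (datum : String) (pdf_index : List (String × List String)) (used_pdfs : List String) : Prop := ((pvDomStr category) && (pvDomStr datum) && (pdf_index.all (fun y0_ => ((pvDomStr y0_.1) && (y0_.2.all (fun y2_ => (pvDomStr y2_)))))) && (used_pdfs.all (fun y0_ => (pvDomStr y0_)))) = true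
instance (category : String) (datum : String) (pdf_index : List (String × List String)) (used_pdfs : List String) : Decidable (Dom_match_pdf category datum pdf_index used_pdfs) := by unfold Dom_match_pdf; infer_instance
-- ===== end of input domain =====

-- B folds A's two full scans over the candidates (date-match scan, then first-unused
-- fallback scan) into one forward pass recording the fallback; the Python used_pdfs.add
-- mutation is identical in A and B and the equivalence proved is about the return value.


-- ===== PORT A =====
-- the date-pattern condition of A's first loop (the four 'in pdf_lower' tests, in order)
def aHit (month : String) (yearShort : String) (pdf : String) : Bool :=
  let pdfLower := PySem.Str.lower pdf
  PySem.Str.isIn (month ++ yearShort) pdfLower ||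
  PySem.Str.isIn (month ++ "_" ++ yearShort) pdfLower ||
  PySem.Str.isIn (month ++ "-" ++ yearShort) pdfLower ||
  PySem.Str.isIn (yearShort ++ month) pdfLower

-- A's first loop: first unused candidate satisfying the date pattern
def aLoop1 (used : List String) (month : String) (yearShort : String) : List String → Option String
  | [] => none
  | pdf :: rest =>
      if PySem.Set.contains used pdf then aLoop1 used month yearShort rest
      else if aHit month yearShort pdf then some pdf
      else aLoop1 used month yearShort rest

-- A's second loop: first unused candidate
def aLoop2 (used : List String) : List String → Option String
  | [] => none
  | pdf :: rest =>
      if !(PySem.Set.contains used pdf) then some pdf else aLoop2 used rest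

def match_pdf (category : String) (datum : String) (pdf_index : List (String × List String)) (used_pdfs : List String) : String :=
  let candidates := (PySem.Dict.mk pdf_index).getD category []
  if candidates = [] then ""
  else
    let month := PySem.Str.slice datum (some 5) (some 7)
    let yearShort := PySem.Str.slice datum (some 2) (some 4)
    match aLoop1 used_pdfs month yearShort candidates with
    | some pdf => pdf
    | none =>
        match aLoop2 used_pdfs candidates with
        | some pdf => pdf
        | none => ""

-- ===== PORT B =====
-- B's pattern test: any of the four pattern strings occurs in the lowered pdf name
def bHit (patterns : List String) (pdf : String) : Bool :=
  let low := PySem.Str.lower pdf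
  patterns.any (fun p => PySem.Str.isIn p low)

-- B's single pass, carrying the recorded fallback (None until the first unused non-match)
def bLoop (used : List String) (patterns : List String) (fallback : Option String) : List String → String
  | [] => (match fallback with | some f => f | none => "")
  | pdf :: rest =>
      if PySem.Set.contains used pdf then bLoop used patterns fallback rest
      else if bHit patterns pdf then pdf
      else bLoop used patterns (match fallback with | some f => some f | none => some pdf) rest

def match_pdf_alt (category : String) (datum : String) (pdf_index : List (String × List String)) (used_pdfs : List String) : String :=
  let candidates := (PySem.Dict.mk pdf_index).getD category []
  if candidates = [] then ""
  else
    let month := PySem.Str.slice datum (some 5) (some 7)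
    let yearShort := PySem.Str.slice datum (some 2) (some 4)
    let patterns := [month ++ yearShort, month ++ "_" ++ yearShort,
                     month ++ "-" ++ yearShort, yearShort ++ month]
    bLoop used_pdfs patterns none candidates

-- ===== PRECONDITION & SPEC =====
def Spec_match_pdf (category : String) (datum : String) (pdf_index : List (String × List String)) (used_pdfs : List String) (out : String) : Prop := out = match_pdf_alt category datum pdf_index used_pdfs
instance (category : String) (datum : String) (pdf_index : List (String × List String)) (used_pdfs : List String) (out : String) : Decidable (Spec_match_pdf category datum pdf_index used_pdfs out) := by unfold Spec_match_pdf; infer_instance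

-- ===== CLAIM (what is proved, stated in full; the proofs are below) =====
def Claim_equal_match_pdf : Prop := ∀ (category : String) (datum : String) (pdf_index : List (String × List String)) (used_pdfs : List String), Dom_match_pdf category datum pdf_index used_pdfs → Spec_match_pdf category datum pdf_index used_pdfs (match_pdf category datum pdf_index used_pdfs)

-- ===== LEMMAS AND PROOFS =====

-- B's list-of-patterns test agrees with A's inline disjunction
theorem bHit_eq_aHit (month yearShort pdf : String) :
    bHit [month ++ yearShort, month ++ "_" ++ yearShort,
          month ++ "-" ++ yearShort, yearShort ++ month] pdf = aHit month yearShort pdf := by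
  simp [bHit, aHit, List.any, Bool.or_assoc]

-- the single pass with fallback fb equals: first date hit, else fb, else first unused
theorem bLoop_eq (used : List String) (month yearShort : String) (fb : Option String)
    (cands : List String) :
    bLoop used [month ++ yearShort, month ++ "_" ++ yearShort,
                month ++ "-" ++ yearShort, yearShort ++ month] fb cands =
      (match aLoop1 used month yearShort cands with
       | some pdf => pdf
       | none =>
         match fb with
         | some f => f
         | none => (match aLoop2 used cands with | some pdf => pdf | none => "")) := by
  induction cands generalizing fb with
  | nil => cases fb <;> simp [bLoop, aLoop1, aLoop2]
  | cons pdf rest ih =>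
      by_cases hu : pdf ∈ used
      · simp [bLoop, aLoop1, aLoop2, hu, ih]
      · by_cases hh : aHit month yearShort pdf = true
        · simp [bLoop, aLoop1, hu, hh, bHit_eq_aHit]
        · cases fb with
          | some f =>
              simp [bLoop, aLoop1, hu, hh, bHit_eq_aHit, ih]
          | none =>
              simp [bLoop, aLoop1, aLoop2, hu, hh, bHit_eq_aHit, ih]

-- ===== VERDICT (by name: the statement is the Claim_ definition above) =====
theorem match_pdf_spec : Claim_equal_match_pdf := by
  intro category datum pdf_index used_pdfs _
  unfold Spec_match_pdf match_pdf match_pdf_alt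
  by_cases hc : (PySem.Dict.mk pdf_index).getD category [] = []
  · simp [hc]
  · simp only [hc, if_false]
    rw [bLoop_eq]
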